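-- pv_equiv track=rewrite | github.com/thaddeuspearson/LS-PY110 | Lesson_1/sort_by_consonant_count.py | sort_by_consonant_count
-- ===== SOURCE A (Python) =====
-- def get_max_adjacent_consonant_count(word):
--     max_consonant_count = 0
--     curr_consonant_count = 0
--     word = ''.join(word.split())
--
--     for c in word:
--         if c.lower() in "aeiou":
--             max_consonant_count = max(max_consonant_count,
--                                       curr_consonant_count)
--             curr_consonant_count = 0
--         else:
--             curr_consonant_count += 1
--
--     max_consonant_count = max(max_consonant_count, curr_consonant_count)
--     return max_consonant_count if max_consonant_count > 1 else 0
--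
-- def sort_by_consonant_count(word_list):
--     lookup = {}
--     sorted_words = []
--
--     for word in word_list:
--         max_adjacent_consonants = get_max_adjacent_consonant_count(word)
--         max_adjacent_consonant_words = lookup.setdefault(
--                                                 max_adjacent_consonants, [])
--         max_adjacent_consonant_words.append(word)
--
--     sorted_lookup_keys = sorted(lookup.keys(), reverse=True)
--
--     for k in sorted_lookup_keys:
--         sorted_words.extend(lookup[k])
--     return sorted_words
-- ===== SOURCE B (Python) =====
-- def _max_adjacent_consonants(word):
--     runs = [0]
--     for c in ''.join(word.split()):
--         if c.lower() in "aeiou":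
--             runs.append(0)
--         else:
--             runs[-1] += 1
--     longest = max(runs)
--     return longest if longest > 1 else 0
--
--
-- def sort_by_consonant_count(word_list):
--     return sorted(word_list, key=_max_adjacent_consonants, reverse=True)
-- ===== Notes on version B (the rewrite author's own statement) =====
-- stated objective: simpler
-- what changed: Replaced the dict-of-buckets, descending key-sort and extend loop with a single stable descending sort keyed by a restructured helper that collects run lengths in a list and takes their max instead of maintaining two running counters; sort stability keeps equal-count words in input order, matching A's bucket order.
import Mathlib
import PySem

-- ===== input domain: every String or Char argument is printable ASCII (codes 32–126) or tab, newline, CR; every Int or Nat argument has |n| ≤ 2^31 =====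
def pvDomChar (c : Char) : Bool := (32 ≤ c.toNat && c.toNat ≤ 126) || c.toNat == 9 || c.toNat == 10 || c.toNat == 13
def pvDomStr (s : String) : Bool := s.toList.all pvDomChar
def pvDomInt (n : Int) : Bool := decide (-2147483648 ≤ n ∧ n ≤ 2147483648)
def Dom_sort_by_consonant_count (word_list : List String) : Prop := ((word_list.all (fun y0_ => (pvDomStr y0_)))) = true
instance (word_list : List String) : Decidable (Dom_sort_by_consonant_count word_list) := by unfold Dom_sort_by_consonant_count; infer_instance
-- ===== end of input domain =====

-- B replaces A's dict-of-buckets + descending key-sort + extend loop with one stable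
-- descending sort, keyed by a helper restructured to collect run lengths in a list and
-- take their max instead of maintaining two running counters (objective: simpler).

-- ===== PORT A =====
-- ''.join(word.split()) = Chars.join [] (Chars.split₀ …); c.lower() in "aeiou" on a single
-- char is membership in the five vowel characters (exact).
def get_max_adjacent_consonant_count (word : String) : Int :=
  let w := PySem.Chars.join [] (PySem.Chars.split₀ word.toList)
  let p := w.foldl (fun (p : Int × Int) c =>
      if ['a', 'e', 'i', 'o', 'u'].contains (PySem.Chars.lowerChar c)
      then (max p.1 p.2, 0) else (p.1, p.2 + 1)) (0, 0)
  let m := max p.1 p.2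
  if m > 1 then m else 0

def sort_by_consonant_count (word_list : List String) : List String :=
  -- lookup.setdefault(k, []).append(word) sets lookup[k] = lookup.get(k, []) + [word]:
  -- exactly PySem.Dict.modify k [] (· ++ [word]) (new keys append at the end, as setdefault does)
  let lookup : PySem.Dict Int (List String) := word_list.foldl
      (fun d word => d.modify (get_max_adjacent_consonant_count word) [] (fun l => l ++ [word]))
      PySem.Dict.empty
  let sorted_lookup_keys := PySem.List.sorted lookup.keys (fun x => x) true
  -- lookup[k] for k drawn from lookup's keys is always present: getD [] is exact here
  sorted_lookup_keys.foldl (fun sorted_words k => sorted_words ++ lookup.getD k []) []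

-- ===== PORT B =====
-- loop body of Source B's helper: runs.append(0) → rs ++ [0];  runs[-1] += 1 →
-- rs.dropLast ++ [last + 1] (runs is never empty, so getLastD 0 is its last element)
def pvRunsStep (rs : List Int) (c : Char) : List Int :=
  if ['a', 'e', 'i', 'o', 'u'].contains (PySem.Chars.lowerChar c)
  then rs ++ [0]
  else rs.dropLast ++ [rs.getLastD 0 + 1]

-- max(runs) → List.max?; runs is nonempty, so the getD 0 default is never taken
def pvMaxAdjacentConsonants (word : String) : Int :=
  let runs := (PySem.Chars.join [] (PySem.Chars.split₀ word.toList)).foldl pvRunsStep [0]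
  let longest := (PySem.List.max? runs (fun x => x)).getD 0
  if longest > 1 then longest else 0

def sort_by_consonant_count_alt (word_list : List String) : List String :=
  PySem.List.sorted word_list (fun w => pvMaxAdjacentConsonants w) true

-- ===== PRECONDITION & SPEC =====
def Spec_sort_by_consonant_count (word_list : List String) (out : List String) : Prop := out = sort_by_consonant_count_alt word_list
instance (word_list : List String) (out : List String) : Decidable (Spec_sort_by_consonant_count word_list out) := by unfold Spec_sort_by_consonant_count; infer_instance

-- ===== CLAIM (what is proved, stated in full; the proofs are below) =====
def Claim_equal_sort_by_consonant_count : Prop := ∀ (word_list : List String), Dom_sort_by_consonant_count word_list → Spec_sort_by_consonant_count word_list (sort_by_consonant_count word_list)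

-- ===== LEMMAS AND PROOFS =====

-- ---- part 1: the two key helpers agree ----

-- proof-side name for A's loop body
def pvPairStep (p : Int × Int) (c : Char) : Int × Int :=
  if ['a', 'e', 'i', 'o', 'u'].contains (PySem.Chars.lowerChar c)
  then (max p.1 p.2, 0) else (p.1, p.2 + 1)

theorem runs_foldl_append (l : List Char) (rs ys : List Int) (h : ys ≠ []) :
    l.foldl pvRunsStep (rs ++ ys) = rs ++ l.foldl pvRunsStep ys := by
  induction l generalizing ys with
  | nil => simp
  | cons c t ih =>
    simp only [List.foldl_cons, pvRunsStep]
    split_ifs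
    · rw [List.append_assoc, ih _ (by simp)]
    · rw [List.dropLast_append_of_ne_nil h,
          show (rs ++ ys).getLastD 0 = ys.getLastD 0 by
            simp only [List.getLastD_eq_getLast?, List.getLast?_append_of_ne_nil _ h],
          List.append_assoc, ih _ (by simp)]

theorem runs_ne_nil (l : List Char) (rs : List Int) (h : rs ≠ []) :
    l.foldl pvRunsStep rs ≠ [] := by
  induction l generalizing rs with
  | nil => exact h
  | cons c t ih =>
    simp only [List.foldl_cons, pvRunsStep]
    split_ifs <;> exact ih _ (by simp)

theorem runs_nonneg (l : List Char) (rs : List Int) (h : ∀ y ∈ rs, 0 ≤ y) :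
    ∀ y ∈ l.foldl pvRunsStep rs, 0 ≤ y := by
  induction l generalizing rs with
  | nil => exact h
  | cons c t ih =>
    simp only [List.foldl_cons, pvRunsStep]
    split_ifs
    · refine ih _ ?_
      intro y hy
      rcases List.mem_append.mp hy with hy | hy
      · exact h y hy
      · simp at hy; omega
    · refine ih _ ?_
      intro y hy
      rcases List.mem_append.mp hy with hy | hy
      · exact h y (List.dropLast_subset _ hy)
      · have h0 : 0 ≤ rs.getLastD 0 := by
          cases rs with
          | nil => simp
          | cons a as =>
            refine h _ ?_
            simp only [List.getLastD_eq_getLast?,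
              List.getLast?_eq_getLast_of_ne_nil (List.cons_ne_nil a as), Option.getD_some]
            exact List.getLast_mem _
        simp only [List.getLastD_eq_getLast?] at h0
        simp at hy; omega

theorem foldl_max_init (t : List Int) (a b : Int) :
    t.foldl max (max a b) = max a (t.foldl max b) := by
  induction t generalizing b with
  | nil => simp
  | cons x xs ih => simp only [List.foldl_cons, max_assoc, ih]

theorem foldl_max_le_init (rs : List Int) (a : Int) : a ≤ rs.foldl max a := by
  induction rs generalizing a with
  | nil => simp
  | cons x xs ih => exact le_trans (le_max_left a x) (ih _)

-- invariant: A's (max, cur) pair and B's run list compute the same final maximum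
theorem runs_inv (l : List Char) (m c : Int) (hc : 0 ≤ c) :
    max (l.foldl pvPairStep (m, c)).1 (l.foldl pvPairStep (m, c)).2
      = max m ((l.foldl pvRunsStep [c]).foldl max 0) := by
  induction l generalizing m c with
  | nil =>
    simp only [List.foldl_nil, List.foldl_cons]
    rw [max_comm (0 : Int) c, max_eq_left hc]
  | cons a t ih =>
    simp only [List.foldl_cons, pvPairStep, pvRunsStep]
    split_ifs
    · have h1 : t.foldl pvRunsStep ([c] ++ [0]) = [c] ++ t.foldl pvRunsStep [0] :=
        runs_foldl_append t [c] [0] (by simp)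
      simp only [List.singleton_append] at h1 ⊢
      rw [h1, ih (max m c) 0 le_rfl]
      simp only [List.foldl_cons]
      rw [max_comm (0 : Int) c, foldl_max_init, max_assoc]
    · simp only [List.dropLast_singleton, List.nil_append]
      rw [show ([c] : List Int).getLastD 0 = c by simp]
      exact ih m (c + 1) (by omega)

theorem key_eq (w : String) :
    pvMaxAdjacentConsonants w = get_max_adjacent_consonant_count w := by
  simp only [pvMaxAdjacentConsonants, get_max_adjacent_consonant_count]
  have hfoldA : ∀ (l : List Char),
      l.foldl (fun (p : Int × Int) c =>
        if ['a', 'e', 'i', 'o', 'u'].contains (PySem.Chars.lowerChar c)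
        then (max p.1 p.2, 0) else (p.1, p.2 + 1)) (0, 0)
      = l.foldl pvPairStep (0, 0) := fun l => rfl
  set l := PySem.Chars.join [] (PySem.Chars.split₀ w.toList) with hl
  rw [hfoldA]
  -- identify max(runs) with the running max starting at 0
  obtain ⟨x, t, hxt⟩ := List.exists_cons_of_ne_nil (runs_ne_nil l [0] (by simp))
  have hx0 : 0 ≤ x := by
    have := runs_nonneg l [0] (by simp) x (by rw [hxt]; simp)
    exact this
  have hmax : (PySem.List.max? (l.foldl pvRunsStep [0]) (fun x => x)).getD 0
      = (l.foldl pvRunsStep [0]).foldl max 0 := by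
    rw [hxt, PySem.List.max?_id_cons]
    simp only [Option.getD_some, List.foldl_cons]
    rw [max_comm (0 : Int) x, max_eq_left hx0]
  have hri := runs_inv l 0 0 le_rfl
  rw [max_eq_right (foldl_max_le_init (l.foldl pvRunsStep [0]) 0)] at hri
  rw [hmax, ← hri]

-- ---- part 2: the bucket concatenation equals one stable descending sort ----

theorem insertBy_skip {α : Type} (bef : α → α → Bool) (x : α) (l1 l2 : List α)
    (h : ∀ y ∈ l1, bef x y = false) :
    PySem.List.insertBy bef x (l1 ++ l2) = l1 ++ PySem.List.insertBy bef x l2 := by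
  induction l1 with
  | nil => simp
  | cons y ys ih =>
    have hy := h y (List.mem_cons_self)
    simp [PySem.List.insertBy, hy, ih (fun z hz => h z (List.mem_cons_of_mem _ hz))]

theorem insertBy_front {α : Type} (bef : α → α → Bool) (x : α) (l : List α)
    (h : ∀ y ∈ l, bef x y = true) :
    PySem.List.insertBy bef x l = x :: l := by
  cases l with
  | nil => rfl
  | cons y ys => simp [PySem.List.insertBy, h y (List.mem_cons_self)]

-- stable reverse sort = concatenation of the key buckets along any strictly
-- descending key list covering all keys
theorem sorted_buckets {α : Type} (key : α → Int) (xs : List α) (ks : List Int)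
    (hks : ks.Pairwise (· > ·)) (hmem : ∀ w ∈ xs, key w ∈ ks) :
    PySem.List.sorted xs key true = ks.flatMap (fun k => xs.filter (fun w => key w == k)) := by
  induction xs using List.reverseRecOn with
  | nil => simp [PySem.List.sorted_rev_eq_foldl_insertBy]
  | append_singleton xs x ih =>
    have hx : key x ∈ ks := hmem x (by simp)
    obtain ⟨ks1, ks2, rfl⟩ := List.append_of_mem hx
    rw [List.pairwise_append] at hks
    obtain ⟨hp1, hp2, hcross⟩ := hks
    rw [List.pairwise_cons] at hp2
    have h1 : ∀ k ∈ ks1, key x < k := fun k hk => hcross k hk (key x) (by simp)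
    have h2 : ∀ k ∈ ks2, k < key x := fun k hk => hp2.1 k hk
    rw [PySem.List.sorted_rev_eq_foldl_insertBy, List.foldl_append, List.foldl_cons,
        List.foldl_nil, ← PySem.List.sorted_rev_eq_foldl_insertBy,
        ih (fun w hw => hmem w (by simp [hw]))]
    have hB1 : ∀ k ∈ ks1, ((xs ++ [x]).filter (fun w => key w == k))
        = xs.filter (fun w => key w == k) := by
      intro k hk
      have : (key x == k) = false := by
        simp only [beq_eq_false_iff_ne, ne_eq]
        exact fun e => absurd (e ▸ h1 k hk) (lt_irrefl _)
      simp [List.filter_append, this]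
    have hB2 : ∀ k ∈ ks2, ((xs ++ [x]).filter (fun w => key w == k))
        = xs.filter (fun w => key w == k) := by
      intro k hk
      have : (key x == k) = false := by
        simp only [beq_eq_false_iff_ne, ne_eq]
        exact fun e => absurd (e ▸ h2 k hk) (lt_irrefl _)
      simp [List.filter_append, this]
    rw [List.flatMap_append, List.flatMap_cons, List.flatMap_append, List.flatMap_cons,
        List.flatMap_congr hB1, List.flatMap_congr hB2]
    have hBx : (xs ++ [x]).filter (fun w => key w == key x)
        = xs.filter (fun w => key w == key x) ++ [x] := by
      simp [List.filter_append]
    rw [hBx, ← List.append_assoc]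
    rw [insertBy_skip _ x
        (ks1.flatMap (fun k => xs.filter (fun w => key w == k))
          ++ xs.filter (fun w => key w == key x))
        (ks2.flatMap (fun k => xs.filter (fun w => key w == k)))
        ?_]
    · rw [insertBy_front _ x _ ?_]
      · simp
      · intro y hy
        simp only [List.mem_flatMap, List.mem_filter] at hy
        obtain ⟨k, hk, _, hky⟩ := hy
        have : key y = k := by simpa using hky
        simp [this, h2 k hk]
    · intro y hy
      simp only [List.mem_append, List.mem_flatMap, List.mem_filter] at hy
      rcases hy with ⟨k, hk, _, hky⟩ | ⟨_, hky⟩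
      · have : key y = k := by simpa using hky
        simp [this, not_lt.mpr (le_of_lt (h1 k hk))]
      · have : key y = key x := by simpa using hky
        simp [this]

theorem sort_eq (word_list : List String) :
    sort_by_consonant_count word_list = sort_by_consonant_count_alt word_list := by
  simp only [sort_by_consonant_count, sort_by_consonant_count_alt]
  have hkey : (fun w => pvMaxAdjacentConsonants w)
      = (fun w => get_max_adjacent_consonant_count w) := funext key_eq
  rw [hkey]
  have hfold : word_list.foldl
      (fun d word => d.modify (get_max_adjacent_consonant_count word) [] (fun l => l ++ [word]))
      PySem.Dict.empty
      = (word_list.map (fun w => (get_max_adjacent_consonant_count w, w))).foldl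
          (fun d p => d.modify p.1 [] (fun l => l ++ [p.2])) PySem.Dict.empty := by
    rw [List.foldl_map]
  have hgetD : ∀ c, (word_list.foldl
      (fun d word => d.modify (get_max_adjacent_consonant_count word) [] (fun l => l ++ [word]))
      PySem.Dict.empty).getD c []
      = word_list.filter (fun w => get_max_adjacent_consonant_count w == c) := by
    intro c
    rw [hfold, PySem.Dict.getD_foldl_modify_append]
    simp [List.filter_map, Function.comp_def, List.map_map]
  have hkeys : (word_list.foldl
      (fun d word => d.modify (get_max_adjacent_consonant_count word) [] (fun l => l ++ [word]))
      PySem.Dict.empty).keys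
      = PySem.Set.ofList (word_list.map get_max_adjacent_consonant_count) := by
    rw [PySem.Dict.keys_foldl_modify_key word_list get_max_adjacent_consonant_count []
        (fun _ word => fun l => l ++ [word]) PySem.Dict.empty]
    simp [PySem.Set.update_nil_left]
  rw [PySem.List.foldl_append_eq_flatMap, List.nil_append, hkeys]
  have hnd : (PySem.List.sorted (PySem.Set.ofList (word_list.map get_max_adjacent_consonant_count))
      (fun x => x) true).Nodup :=
    (PySem.List.sorted_perm _ _ _).nodup_iff.mpr (PySem.Set.nodup_ofList _)
  have hpw : (PySem.List.sorted (PySem.Set.ofList (word_list.map get_max_adjacent_consonant_count))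
      (fun x => x) true).Pairwise (· > ·) := by
    have h1 := PySem.List.sorted_pairwise_rev
      (PySem.Set.ofList (word_list.map get_max_adjacent_consonant_count)) (fun x => x)
    exact (h1.and hnd).imp (fun h => lt_of_le_of_ne h.1 (fun e => h.2 e.symm))
  have hcomp : ∀ w ∈ word_list, get_max_adjacent_consonant_count w ∈
      PySem.List.sorted (PySem.Set.ofList (word_list.map get_max_adjacent_consonant_count))
        (fun x => x) true := by
    intro w hw
    rw [PySem.List.mem_sorted, PySem.Set.mem_ofList]
    exact List.mem_map_of_mem hw
  rw [List.flatMap_congr (fun k _ => hgetD k),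
      ← sorted_buckets get_max_adjacent_consonant_count word_list _ hpw hcomp]

-- ===== VERDICT (by name: the statement is the Claim_ definition above) =====
theorem sort_by_consonant_count_spec : Claim_equal_sort_by_consonant_count := by
  intro word_list _
  unfold Spec_sort_by_consonant_count
  exact sort_eq word_list
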